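-- pv_equiv track=rewrite | github.com/zenmar/brain-data-deep-learning | Cascade/MultiClass/data_utils_multi.py | separate_list
-- ===== SOURCE A (Python) =====
-- def separate_list(all_files_list):
--     rest_list = []
--     mem_list = []
--     math_list = []
--     motor_list = []
--     for item in all_files_list:
--         if "rest" in item:
--             rest_list.append(item)
--         if "memory" in item:
--             mem_list.append(item)
--         if "math" in item:
--             math_list.append(item)
--         if "motor" in item:
--             motor_list.append(item)
--     return rest_list, mem_list, math_list, motor_list
-- ===== SOURCE B (Python) =====
-- def separate_list(all_files_list):
--     def matching(kw):
--         return [item for item in all_files_list if kw in item]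
--     return matching("rest"), matching("memory"), matching("math"), matching("motor")
-- ===== Notes on version B (the rewrite author's own statement) =====
-- stated objective: idiomatic
-- what changed: B replaces A's single pass that maintains four accumulators with four independent staged filter passes, one per keyword, each producing its list directly.
import Mathlib
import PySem

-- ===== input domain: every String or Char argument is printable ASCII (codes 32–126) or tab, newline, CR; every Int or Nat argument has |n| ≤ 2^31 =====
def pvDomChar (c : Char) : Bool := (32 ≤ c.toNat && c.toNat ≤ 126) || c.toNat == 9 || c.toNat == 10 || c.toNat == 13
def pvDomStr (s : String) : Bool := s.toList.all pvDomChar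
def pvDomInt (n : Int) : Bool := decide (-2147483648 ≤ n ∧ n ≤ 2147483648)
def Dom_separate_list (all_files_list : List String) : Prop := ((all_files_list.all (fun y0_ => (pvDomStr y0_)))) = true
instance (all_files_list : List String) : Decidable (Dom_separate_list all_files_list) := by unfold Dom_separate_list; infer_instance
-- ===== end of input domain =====

-- B replaces A's single pass maintaining four accumulators with four staged filter passes, one per keyword (idiomatic, same cost).
-- ===== PORT A =====
-- A's loop body: the four independent "if kw in item: list.append(item)" statements
def stepA (st : List String × List String × List String × List String) (item : String) :
    List String × List String × List String × List String :=
  let st := if PySem.Str.isIn "rest" item then (st.1 ++ [item], st.2.1, st.2.2.1, st.2.2.2) else st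
  let st := if PySem.Str.isIn "memory" item then (st.1, st.2.1 ++ [item], st.2.2.1, st.2.2.2) else st
  let st := if PySem.Str.isIn "math" item then (st.1, st.2.1, st.2.2.1 ++ [item], st.2.2.2) else st
  let st := if PySem.Str.isIn "motor" item then (st.1, st.2.1, st.2.2.1, st.2.2.2 ++ [item]) else st
  st

def separate_list (all_files_list : List String) : List String × List String × List String × List String :=
  all_files_list.foldl stepA ([], [], [], [])

-- ===== PORT B =====
-- B: one independent filter pass over the whole list per keyword
def matching_files (all_files_list : List String) (kw : String) : List String :=
  all_files_list.filter (fun item => PySem.Str.isIn kw item)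

def separate_list_alt (all_files_list : List String) : List String × List String × List String × List String :=
  (matching_files all_files_list "rest", matching_files all_files_list "memory",
   matching_files all_files_list "math", matching_files all_files_list "motor")

-- ===== PRECONDITION & SPEC =====
def Spec_separate_list (all_files_list : List String) (out : List String × List String × List String × List String) : Prop := out = separate_list_alt all_files_list
instance (all_files_list : List String) (out : List String × List String × List String × List String) : Decidable (Spec_separate_list all_files_list out) := by unfold Spec_separate_list; infer_instance

-- ===== CLAIM (what is proved, stated in full; the proofs are below) =====
def Claim_equal_separate_list : Prop := ∀ (all_files_list : List String), Dom_separate_list all_files_list → Spec_separate_list all_files_list (separate_list all_files_list)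

-- ===== LEMMAS AND PROOFS =====
theorem stepA_eq (r me ma mo : List String) (x : String) :
    stepA (r, me, ma, mo) x =
      (r ++ if PySem.Str.isIn "rest" x then [x] else [],
       me ++ if PySem.Str.isIn "memory" x then [x] else [],
       ma ++ if PySem.Str.isIn "math" x then [x] else [],
       mo ++ if PySem.Str.isIn "motor" x then [x] else []) := by
  unfold stepA
  split_ifs <;> simp

-- loop invariant: A's fold appends exactly the four filtered sublists to the initial accumulators
theorem loop_eq (l : List String) (r me ma mo : List String) :
    l.foldl stepA (r, me, ma, mo) =
    (r ++ matching_files l "rest", me ++ matching_files l "memory",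
     ma ++ matching_files l "math", mo ++ matching_files l "motor") := by
  induction l generalizing r me ma mo with
  | nil => simp [matching_files]
  | cons x xs ih =>
      rw [List.foldl_cons, stepA_eq, ih]
      simp only [matching_files, List.filter_cons]
      split_ifs <;> simp

-- ===== VERDICT (by name: the statement is the Claim_ definition above) =====
theorem separate_list_spec : Claim_equal_separate_list := by
  intro l _
  unfold Spec_separate_list separate_list separate_list_alt
  rw [loop_eq]
  simp
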